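-- pv_equiv track=rewrite | github.com/Sewef/PTU-Data | py/extract paragraph.py | format_text_to_md
-- ===== SOURCE A (Python) =====
-- KEYWORDS = [
--     "Prerequisites:", "Trigger:", "Effect:", "Target:", "Note:"
-- ]
--
-- def line_starts_with_keyword(line):
--     if line.startswith("[") and line.endswith("]"):
--         return False
--     for kw in KEYWORDS:
--         if line.startswith(kw):
--             return kw
--     return None
--
-- def format_text_to_md(text):
--     lines = text.splitlines()
--     md_lines = []
--     buffer = []
--     inside_section = False  # Track if inside a section title block
--
--     def flush_buffer():
--         if not buffer:
--             return
--         paragraph = " ".join(line.strip() for line in buffer)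
--         md_lines.append(paragraph)
--         md_lines.append("")
--         buffer.clear()
--
--     i = 0
--     while i < len(lines):
--         line = lines[i].strip()
--
--         if not line:
--             flush_buffer()
--             inside_section = False
--             i += 1
--             continue
--
--         # Lines with brackets - level 2 titles, keep brackets
--         if line.startswith("[") and line.endswith("]"):
--             flush_buffer()
--             md_lines.append(f"{line}")
--             md_lines.append("")
--             inside_section = False
--             i += 1
--             continue
--
--         # Check if line starts with a keyword, return the matched keyword or None
--         kw = line_starts_with_keyword(line)
--         if kw:
--             flush_buffer()
--             # Bold only the keyword part (the kw), keep rest as is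
--             rest = line[len(kw):].strip()
--             if rest:
--                 md_lines.append(f"**{kw}** {rest}")
--             else:
--                 md_lines.append(f"**{kw}**")
--             md_lines.append("")
--             inside_section = False
--             i += 1
--             continue
--
--         # Titles level 3 - short, no colon, Title Case, and not inside section
--         if (":" not in line) and (line == line.title()) and len(line.split()) <= 4:
--             flush_buffer()
--             md_lines.append(f"### {line}")
--             md_lines.append("")
--             inside_section = True
--             i += 1
--             continue
--
--         # Normal text lines to buffer
--         buffer.append(line)
--         i += 1
--
--     flush_buffer()
--     return "\n".join(md_lines)
-- ===== SOURCE B (Python) =====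
-- KEYWORDS = [
--     "Prerequisites:", "Trigger:", "Effect:", "Target:", "Note:"
-- ]
--
--
-- def _render_special(line):
--     """Markdown rendering of a non-empty breaker line, or None for a normal text line."""
--     if line.startswith("[") and line.endswith("]"):
--         return line
--     for kw in KEYWORDS:
--         if line.startswith(kw):
--             rest = line[len(kw):].strip()
--             return f"**{kw}** {rest}" if rest else f"**{kw}**"
--     if ":" not in line and line == line.title() and len(line.split()) <= 4:
--         return f"### {line}"
--     return None
--
--
-- def _is_normal(line):
--     return bool(line) and _render_special(line) is None
--
--
-- def format_text_to_md(text):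
--     # Chunk-at-a-time: consume a whole run of normal lines as one paragraph,
--     # or a single breaker line; every block is followed by a blank line, so the
--     # result is one closed-form double-newline join plus a trailing newline.
--     lines = [raw.strip() for raw in text.splitlines()]
--     n = len(lines)
--     blocks = []
--     i = 0
--     while i < n:
--         if _is_normal(lines[i]):
--             j = i
--             while j < n and _is_normal(lines[j]):
--                 j += 1
--             blocks.append(" ".join(lines[i:j]))
--             i = j
--         else:
--             if lines[i]:
--                 blocks.append(_render_special(lines[i]))
--             i += 1
--     return "\n\n".join(blocks) + "\n" if blocks else ""
-- ===== Notes on version B (the rewrite author's own statement) =====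
-- stated objective: alternative
-- what changed: A walks line-by-line with a mutable paragraph buffer, a flush_buffer closure, a dead inside_section flag, and emits each block followed by an empty sentinel string before a final newline-join; B consumes the stripped lines chunk-at-a-time (a whole run of normal lines becomes one paragraph in one inner scan, a breaker line one block), builds a plain block list with no sentinels, and assembles the result with one closed-form double-newline join plus a trailing newline.
import Mathlib
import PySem

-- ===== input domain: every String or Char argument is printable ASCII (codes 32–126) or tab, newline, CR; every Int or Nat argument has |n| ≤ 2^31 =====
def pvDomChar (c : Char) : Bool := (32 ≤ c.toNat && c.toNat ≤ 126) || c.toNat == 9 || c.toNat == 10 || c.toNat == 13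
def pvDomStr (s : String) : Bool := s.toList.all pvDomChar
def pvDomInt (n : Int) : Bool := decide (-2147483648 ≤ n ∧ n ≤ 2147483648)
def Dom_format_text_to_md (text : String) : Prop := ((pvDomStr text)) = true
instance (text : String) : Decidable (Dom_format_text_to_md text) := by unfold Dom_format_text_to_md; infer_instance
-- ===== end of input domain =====

-- B replaces A's line-by-line walk (mutable paragraph buffer, flush_buffer closure, dead
-- inside_section flag, empty-string sentinels after every block joined by newline) with a
-- chunk-at-a-time consumer: a whole run of normal lines becomes one paragraph block, a breaker
-- line one block, assembled by one closed-form double-newline join plus a trailing newline.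

-- ===== PORT A =====

def pvKEYWORDS : List String :=
  ["Prerequisites:", "Trigger:", "Effect:", "Target:", "Note:"]

-- str.title() for ASCII (hand port, exact on Dom: a letter is uppercased after a
-- non-letter and lowercased after a letter; non-letters pass through)
def pvTitleGo : List Char → Bool → List Char
  | [], _ => []
  | c :: cs, prev =>
    (if PySem.Chars.isalpha c then
        (if prev then PySem.Chars.lowerChar c else PySem.Chars.upperChar c)
      else c) :: pvTitleGo cs (PySem.Chars.isalpha c)

def pvTitle (s : String) : String := String.ofList (pvTitleGo s.toList false)

-- the 'for kw in KEYWORDS: if line.startswith(kw): return kw' loop (shared by both Pythons)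
def pvKwScan : List String → String → Option String
  | [], _ => none
  | kw :: kws, line =>
    if PySem.Str.startswith line kw then some kw else pvKwScan kws line

-- A's helper line_starts_with_keyword (False and None both become none; call sites only test truthiness)
def pvLineStartsWithKeyword (line : String) : Option String :=
  if PySem.Str.startswith line "[" && PySem.Str.endswith line "]" then none
  else pvKwScan pvKEYWORDS line

-- A's flush_buffer closure
def pvFlushA (md buf : List String) : List String :=
  if buf = [] then md
  else md ++ [PySem.Str.join " " (buf.map PySem.Str.strip), ""]

-- A's while-loop over lines with state (md_lines, buffer, inside_section)
def pvLoopA : List String → List String → List String → Bool → List String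
  | [], md, buf, _ => pvFlushA md buf
  | l :: rest, md, buf, ins =>
    let line := PySem.Str.strip l
    if line = "" then pvLoopA rest (pvFlushA md buf) [] false
    else if PySem.Str.startswith line "[" && PySem.Str.endswith line "]" then
      pvLoopA rest (pvFlushA md buf ++ [line, ""]) [] false
    else
      match pvLineStartsWithKeyword line with
      | some kw =>
        let r := PySem.Str.strip (PySem.Str.slice line (some (PySem.Str.len kw)) none)
        pvLoopA rest
          (pvFlushA md buf ++
            [(if r ≠ "" then "**" ++ kw ++ "** " ++ r else "**" ++ kw ++ "**"), ""]) [] false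
      | none =>
        if PySem.Str.isIn ":" line = false ∧ line = pvTitle line ∧ (PySem.Str.split₀ line).length ≤ 4 then
          pvLoopA rest (pvFlushA md buf ++ ["### " ++ line, ""]) [] true
        else pvLoopA rest md (buf ++ [line]) ins

def format_text_to_md (text : String) : String :=
  PySem.Str.join "\n" (pvLoopA (PySem.Str.splitlines text) [] [] false)

-- ===== PORT B =====

-- B's _render_special: markdown rendering of a non-empty breaker line, none for a normal line
def pvRenderSpecial (line : String) : Option String :=
  if PySem.Str.startswith line "[" && PySem.Str.endswith line "]" then some line
  else
    match pvKwScan pvKEYWORDS line with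
    | some kw =>
      let rest := PySem.Str.strip (PySem.Str.slice line (some (PySem.Str.len kw)) none)
      some (if rest ≠ "" then "**" ++ kw ++ "** " ++ rest else "**" ++ kw ++ "**")
    | none =>
      if PySem.Str.isIn ":" line = false ∧ line = pvTitle line ∧ (PySem.Str.split₀ line).length ≤ 4 then
        some ("### " ++ line)
      else none

-- B's _is_normal
def pvIsNormal (line : String) : Bool :=
  decide (line ≠ "") && (pvRenderSpecial line).isNone

-- B's outer while loop: one whole run of normal lines (the inner j-scan, here
-- takeWhile/dropWhile) becomes one paragraph block; a breaker line becomes one block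
def pvBlocksB : List String → List String
  | [] => []
  | l :: t =>
    if pvIsNormal l then
      PySem.Str.join " " (l :: t.takeWhile pvIsNormal) :: pvBlocksB (t.dropWhile pvIsNormal)
    else if l = "" then pvBlocksB t
    else
      match pvRenderSpecial l with
      | some r => r :: pvBlocksB t
      | none => pvBlocksB t
termination_by ls => ls.length
decreasing_by
  all_goals first
    | (have := List.length_dropWhile_le pvIsNormal t; simp; omega)
    | simp

def format_text_to_md_alt (text : String) : String :=
  let blocks := pvBlocksB ((PySem.Str.splitlines text).map PySem.Str.strip)
  if blocks = [] then "" else PySem.Str.join "\n\n" blocks ++ "\n"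

-- ===== PRECONDITION & SPEC =====
def Spec_format_text_to_md (text : String) (out : String) : Prop := out = format_text_to_md_alt text
instance (text : String) (out : String) : Decidable (Spec_format_text_to_md text out) := by unfold Spec_format_text_to_md; infer_instance

-- ===== CLAIM (what is proved, stated in full; the proofs are below) =====
def Claim_equal_format_text_to_md : Prop := ∀ (text : String), Dom_format_text_to_md text → Spec_format_text_to_md text (format_text_to_md text)

-- ===== LEMMAS AND PROOFS =====

-- intermediate spec: A's buffered walk, over already-stripped lines, producing the block list
def pvBlocksS : List String → List String → List String
  | pend, [] => if pend = [] then [] else [PySem.Str.join " " pend]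
  | pend, l :: t =>
    if pvIsNormal l then pvBlocksS (pend ++ [l]) t
    else
      (if pend = [] then [] else [PySem.Str.join " " pend]) ++
      (if l = "" then []
       else match pvRenderSpecial l with | some r => [r] | none => []) ++
      pvBlocksS [] t

def pvFlat (bs : List String) : List String := bs.flatMap (fun b => [b, ""])

theorem pv_dropWhile_idem {α : Type} (p : α → Bool) (l : List α) :
    List.dropWhile p (List.dropWhile p l) = List.dropWhile p l := by
  induction l with
  | nil => simp
  | cons a l ih =>
    by_cases h : p a = true
    · simpa [h] using ih
    · simp [h]

theorem pv_dropWhile_prefix {α : Type} (p : α → Bool) {l b : List α}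
    (hl : List.dropWhile p l = l) (hb : b <+: l) : List.dropWhile p b = b := by
  cases b with
  | nil => simp
  | cons x b' =>
    obtain ⟨t, ht⟩ := hb
    cases l with
    | nil => simp at ht
    | cons y l' =>
      have hx : x = y := by
        have := congrArg (List.head?) ht
        simpa using this
      subst hx
      by_cases h : p x = true
      · rw [List.dropWhile_cons_of_pos h] at hl
        exact absurd hl (by
          intro h'
          have := congrArg List.length h'
          have hle := List.length_dropWhile_le p l'
          simp at this
          omega)
      · simp [h]

theorem pv_strip_chars_idem (cs : List Char) :
    PySem.Chars.strip (PySem.Chars.strip cs) = PySem.Chars.strip cs := by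
  unfold PySem.Chars.strip PySem.Chars.lstrip PySem.Chars.rstrip
  have hA := pv_dropWhile_idem PySem.Chars.isspace cs
  have hpref : (List.dropWhile PySem.Chars.isspace
      (List.dropWhile PySem.Chars.isspace cs).reverse).reverse <+:
      List.dropWhile PySem.Chars.isspace cs := by
    simpa using List.reverse_prefix.mpr
      (List.dropWhile_suffix (l := (List.dropWhile PySem.Chars.isspace cs).reverse)
        PySem.Chars.isspace)
  rw [pv_dropWhile_prefix _ hA hpref, List.reverse_reverse, pv_dropWhile_idem]

theorem pv_strip_idem (s : String) :
    PySem.Str.strip (PySem.Str.strip s) = PySem.Str.strip s := by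
  simp [PySem.Str.strip, pv_strip_chars_idem]

theorem pv_flushA_eq (md buf : List String) (h : ∀ b ∈ buf, PySem.Str.strip b = b) :
    pvFlushA md buf = md ++ (if buf = [] then [] else [PySem.Str.join " " buf, ""]) := by
  unfold pvFlushA
  have hmap : buf.map PySem.Str.strip = buf := by
    have := List.map_congr_left (g := id) h
    simpa using this
  rw [hmap]
  split_ifs <;> simp

-- A's loop equals the buffered block walk on the stripped lines
theorem pvLoopA_blocks (lines : List String) :
    ∀ (md buf : List String) (ins : Bool), (∀ b ∈ buf, PySem.Str.strip b = b) →
      pvLoopA lines md buf ins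
        = md ++ pvFlat (pvBlocksS buf (lines.map PySem.Str.strip)) := by
  induction lines with
  | nil =>
    intro md buf ins h
    simp only [pvLoopA, List.map_nil, pvBlocksS]
    rw [pv_flushA_eq md buf h]
    split_ifs <;> simp [pvFlat]
  | cons l rest ih =>
    intro md buf ins h
    have hstr := pv_strip_idem l
    simp only [pvLoopA, List.map_cons]
    generalize hg : PySem.Str.strip l = line
    rw [hg] at hstr
    by_cases h0 : line = ""
    · have hn : pvIsNormal line = false := by
        unfold pvIsNormal; simp [h0]
      rw [if_pos h0]
      rw [ih _ [] false (by simp)]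
      rw [pv_flushA_eq md buf h]
      simp only [pvBlocksS, hn, Bool.false_eq_true, if_false, if_pos h0]
      split_ifs <;> simp [pvFlat]
    · by_cases h1 : (PySem.Str.startswith line "[" && PySem.Str.endswith line "]") = true
      · have hr : pvRenderSpecial line = some line := by
          unfold pvRenderSpecial; rw [if_pos h1]
        have hn : pvIsNormal line = false := by
          unfold pvIsNormal; simp [hr]
        rw [if_neg h0, if_pos h1]
        rw [ih _ [] false (by simp)]
        rw [pv_flushA_eq md buf h]
        simp only [pvBlocksS, hn, Bool.false_eq_true, if_false, if_neg h0, hr]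
        split_ifs <;> simp [pvFlat]
      · rw [if_neg h0, if_neg h1]
        have hkw : pvLineStartsWithKeyword line = pvKwScan pvKEYWORDS line := by
          unfold pvLineStartsWithKeyword; rw [if_neg h1]
        cases hk : pvKwScan pvKEYWORDS line with
        | some kw =>
          set r := PySem.Str.strip (PySem.Str.slice line (some (PySem.Str.len kw)) none) with hrdef
          have hr : pvRenderSpecial line
              = some (if r ≠ "" then "**" ++ kw ++ "** " ++ r else "**" ++ kw ++ "**") := by
            unfold pvRenderSpecial; rw [if_neg h1, hk]
          have hn : pvIsNormal line = false := by
            unfold pvIsNormal; simp [hr]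
          rw [hkw, hk]
          dsimp only
          rw [ih _ [] false (by simp)]
          rw [pv_flushA_eq md buf h]
          simp only [pvBlocksS, hn, Bool.false_eq_true, if_false, if_neg h0, hr]
          split_ifs <;> simp_all [pvFlat, PySem.Str.len]
        | none =>
          rw [hkw, hk]
          dsimp only
          by_cases h2 : PySem.Str.isIn ":" line = false ∧
              line = pvTitle line ∧ (PySem.Str.split₀ line).length ≤ 4
          · have hr : pvRenderSpecial line = some ("### " ++ line) := by
              unfold pvRenderSpecial; rw [if_neg h1, hk, if_pos h2]
            have hn : pvIsNormal line = false := by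
              unfold pvIsNormal; simp [hr]
            rw [if_pos h2]
            rw [ih _ [] true (by simp)]
            rw [pv_flushA_eq md buf h]
            simp only [pvBlocksS, hn, Bool.false_eq_true, if_false, if_neg h0, hr]
            split_ifs <;> simp [pvFlat]
          · have hr : pvRenderSpecial line = none := by
              unfold pvRenderSpecial; rw [if_neg h1, hk, if_neg h2]
            have hn : pvIsNormal line = true := by
              unfold pvIsNormal; simp [hr, h0]
            rw [if_neg h2]
            rw [ih _ _ _ ?_]
            · simp only [pvBlocksS, hn, if_true]
            · intro b hb
              rcases List.mem_append.mp hb with hb | hb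
              · exact h b hb
              · simp at hb; subst hb; exact hstr

-- the buffered walk with empty pending equals B's chunked recursion
theorem pvBlocksB_split (t : List String) :
    (if t.takeWhile pvIsNormal = [] then []
      else [PySem.Str.join " " (t.takeWhile pvIsNormal)]) ++ pvBlocksB (t.dropWhile pvIsNormal)
    = pvBlocksB t := by
  cases t with
  | nil => simp
  | cons h tt =>
    by_cases hn : pvIsNormal h = true
    · rw [List.takeWhile_cons_of_pos hn, List.dropWhile_cons_of_pos hn]
      rw [pvBlocksB]
      simp [hn]
    · rw [List.takeWhile_cons_of_neg hn, List.dropWhile_cons_of_neg hn]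
      simp

theorem pvBlocksS_chunks (ls : List String) :
    ∀ pend : List String,
      pvBlocksS pend ls
        = (if pend ++ ls.takeWhile pvIsNormal = [] then []
            else [PySem.Str.join " " (pend ++ ls.takeWhile pvIsNormal)]) ++
          pvBlocksB (ls.dropWhile pvIsNormal) := by
  induction ls with
  | nil =>
    intro pend
    simp [pvBlocksS, pvBlocksB]
  | cons l t ih =>
    intro pend
    by_cases hn : pvIsNormal l = true
    · rw [List.takeWhile_cons_of_pos hn, List.dropWhile_cons_of_pos hn]
      simp only [pvBlocksS, hn, if_true]
      rw [ih (pend ++ [l])]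
      simp
    · rw [List.takeWhile_cons_of_neg hn, List.dropWhile_cons_of_neg hn]
      simp only [pvBlocksS, hn]
      have h0 : pvBlocksS [] t = pvBlocksB t := by
        rw [ih []]
        simpa using pvBlocksB_split t
      rw [h0]
      by_cases h1 : l = ""
      · subst h1
        rw [pvBlocksB]
        simp [hn]
      · rw [pvBlocksB]
        simp only [hn, Bool.false_eq_true, if_false, if_neg h1]
        cases hr : pvRenderSpecial l <;> simp

theorem pvBlocksS_eq_B (ls : List String) : pvBlocksS [] ls = pvBlocksB ls := by
  rw [pvBlocksS_chunks ls []]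
  simpa using pvBlocksB_split ls

-- joining the sentinel-interleaved list by '\n' is the closed form (character level)
theorem pv_join_flat_chars (bs : List (List Char)) :
    PySem.Chars.join ['\n'] (bs.flatMap (fun b => [b, []]))
      = if bs = [] then [] else PySem.Chars.join ['\n', '\n'] bs ++ ['\n'] := by
  induction bs with
  | nil => simp [PySem.Chars.join_nil]
  | cons b bs ih =>
    cases bs with
    | nil =>
      simp [PySem.Chars.join_cons_cons, PySem.Chars.join_singleton]
    | cons c r =>
      have h1 : ((b :: c :: r).flatMap (fun b => [b, []]))
          = b :: [] :: ((c :: r).flatMap (fun b => [b, []])) := by simp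
      rw [h1, PySem.Chars.join_cons_cons]
      have h2 : ((c :: r).flatMap (fun b => [b, []]))
          = c :: [] :: (r.flatMap (fun b => [b, []])) := by simp
      rw [h2, PySem.Chars.join_cons_cons, ← h2, ih]
      simp [PySem.Chars.join_cons_cons]

theorem pv_join_flat (bs : List String) :
    PySem.Str.join "\n" (pvFlat bs)
      = if bs = [] then "" else PySem.Str.join "\n\n" bs ++ "\n" := by
  apply String.toList_injective
  have hmap : (pvFlat bs).map String.toList
      = (bs.map String.toList).flatMap (fun b => [b, []]) := by
    simp [pvFlat, List.map_flatMap, List.flatMap_map]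
  rw [PySem.Str.toList_join, hmap,
    show ("\n" : String).toList = ['\n'] from rfl, pv_join_flat_chars]
  cases bs with
  | nil => simp
  | cons b r =>
    simp [PySem.Str.toList_join, show ("\n\n" : String).toList = ['\n', '\n'] from rfl]

-- ===== VERDICT (by name: the statement is the Claim_ definition above) =====
theorem format_text_to_md_spec : Claim_equal_format_text_to_md := by
  intro text _
  show format_text_to_md text = format_text_to_md_alt text
  unfold format_text_to_md format_text_to_md_alt
  rw [pvLoopA_blocks (PySem.Str.splitlines text) [] [] false (by simp)]
  rw [List.nil_append, pv_join_flat, pvBlocksS_eq_B]
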